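-- pv_equiv track=rewrite | github.com/Youngsdg1/algorithms | 1909/190904/수의새로운연산/soo.py | chapyoro
-- ===== SOURCE A (Python) =====
-- def chapyoro(z):
--     k = 1
--     g = 0
--     while g != z:
--         f = 0
--         for r in range(k):
--             g += 1
--             f += 1
--             if g == z:
--                 break
--         k += 1
--     return [f, k - f]
-- ===== SOURCE B (Python) =====
-- def chapyoro(z):
--     # Walk diagonal by diagonal: t is the d-th triangular number (last cell of diagonal d).
--     d = 1
--     t = 1
--     while t < z:
--         d += 1
--         t += d
--     f = z - t + d
--     return [f, d + 1 - f]
-- ===== Notes on version B (the rewrite author's own statement) =====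
-- stated objective: faster
-- what changed: B jumps diagonal by diagonal using running triangular sums instead of A's cell-by-cell nested counting, so it takes one step per diagonal rather than one per cell.
import Mathlib
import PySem

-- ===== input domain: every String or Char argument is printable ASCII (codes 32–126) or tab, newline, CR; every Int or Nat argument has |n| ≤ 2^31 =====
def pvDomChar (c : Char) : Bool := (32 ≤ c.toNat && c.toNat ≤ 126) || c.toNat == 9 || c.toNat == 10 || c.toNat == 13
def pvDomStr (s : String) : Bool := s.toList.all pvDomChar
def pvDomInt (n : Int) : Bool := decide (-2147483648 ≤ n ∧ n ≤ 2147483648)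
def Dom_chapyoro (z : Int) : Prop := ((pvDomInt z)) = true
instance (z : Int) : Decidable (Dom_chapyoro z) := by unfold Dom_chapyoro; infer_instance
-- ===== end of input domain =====

-- B replaces A's cell-by-cell nested counting with one step per diagonal (running triangular sums).

-- ===== PORT A =====
-- inner 'for r in range(k)' loop: n cells left, state (g, f); returns (g, f, broke?)
def chapyoroInner (n : Nat) (g f z : Int) : Int × Int × Bool :=
  match n with
  | 0 => (g, f, false)
  | n + 1 =>
    let g := g + 1
    let f := f + 1
    if g = z then (g, f, true) else chapyoroInner n g f z

-- outer 'while g != z' loop; fuel only makes the recursion total (A diverges for z < 0)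
def chapyoroLoop (fuel : Nat) (k g f z : Int) : List Int :=
  match fuel with
  | 0 => []
  | fuel + 1 =>
    if g = z then [f, k - f]
    else
      let (g', f', _) := chapyoroInner k.toNat g 0 z
      chapyoroLoop fuel (k + 1) g' f' z

def chapyoro (z : Int) : List Int :=
  chapyoroLoop (z.toNat + 2) 1 0 0 z

-- ===== PORT B =====
-- 'while t < z: d += 1; t += d' loop; fuel only makes the recursion total
def chapyoroAltLoop (fuel : Nat) (d t z : Int) : Int × Int :=
  match fuel with
  | 0 => (d, t)
  | fuel + 1 =>
    if t < z then chapyoroAltLoop fuel (d + 1) (t + (d + 1)) z else (d, t)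

def chapyoro_alt (z : Int) : List Int :=
  let (d, t) := chapyoroAltLoop z.toNat 1 1 z
  let f := z - t + d
  [f, d + 1 - f]

-- ===== PRECONDITION & SPEC =====
-- A raises NameError at z = 0 (f is never assigned) and loops forever for z < 0.
def Pre_chapyoro (z : Int) : Prop := 1 ≤ z
instance (z : Int) : Decidable (Pre_chapyoro z) := by unfold Pre_chapyoro; infer_instance
def pvWitness_chapyoro : Int := (5)

def Spec_chapyoro (z : Int) (out : List Int) : Prop := out = chapyoro_alt z
instance (z : Int) (out : List Int) : Decidable (Spec_chapyoro z out) := by unfold Spec_chapyoro; infer_instance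

-- ===== CLAIM (what is proved, stated in full; the proofs are below) =====
def Claim_equal_chapyoro : Prop := ∀ (z : Int), Dom_chapyoro z → Pre_chapyoro z → Spec_chapyoro z (chapyoro z)

-- ===== LEMMAS AND PROOFS =====

-- inner loop, hit case: z lies within the next n cells, so it breaks exactly at g = z
theorem chapyoroInner_break (n : Nat) (g f z : Int) (h1 : g < z) (h2 : z ≤ g + n) :
    chapyoroInner n g f z = (z, f + (z - g), true) := by
  induction n generalizing g f with
  | zero => simp at h2; omega
  | succ n ih =>
    simp only [chapyoroInner]
    by_cases hz : g + 1 = z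
    · simp [hz]; omega
    · rw [if_neg hz, ih (g + 1) (f + 1) (by omega) (by push_cast at h2 ⊢; omega)]
      have e : f + 1 + (z - (g + 1)) = f + (z - g) := by ring
      rw [e]

-- inner loop, miss case: z beyond the n cells, the whole diagonal is consumed
theorem chapyoroInner_miss (n : Nat) (g f z : Int) (h : g + n < z) :
    chapyoroInner n g f z = (g + n, f + n, false) := by
  induction n generalizing g f with
  | zero => simp [chapyoroInner]
  | succ n ih =>
    simp only [chapyoroInner]
    rw [if_neg (by push_cast at h; omega), ih (g + 1) (f + 1) (by push_cast at h ⊢; omega)]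
    push_cast
    have e1 : g + 1 + (n : Int) = g + ((n : Int) + 1) := by ring
    have e2 : f + 1 + (n : Int) = f + ((n : Int) + 1) := by ring
    rw [e1, e2]

-- one unfolding of A's outer loop when it stops
theorem chapyoroLoop_hit (fuel : Nat) (k f z : Int) :
    chapyoroLoop (fuel + 1) k z f z = [f, k - f] := by
  simp [chapyoroLoop]

-- outer loop of A: with invariant 2*g = (k-1)*k and g < z, it returns the answer
-- characterized by the diagonal D with T(D-1) < z ≤ T(D)
theorem chapyoroLoop_spec (fuel : Nat) :
    ∀ (k g f z : Int), 1 ≤ k → 2 * g = (k - 1) * k → g < z →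
    (z - g).toNat + 1 ≤ fuel →
    ∃ D TD, 1 ≤ D ∧ 2 * TD = D * (D + 1) ∧ TD - D < z ∧ z ≤ TD ∧
      chapyoroLoop fuel k g f z = [z - TD + D, D + 1 - (z - TD + D)] := by
  induction fuel with
  | zero => intro k g f z _ _ _ hfuel; omega
  | succ fuel ih =>
    intro k g f z hk hg hgz hfuel
    simp only [chapyoroLoop, if_neg (show ¬ g = z by omega)]
    have hkNat : (k.toNat : Int) = k := by omega
    by_cases hhit : z ≤ g + k
    · rw [chapyoroInner_break k.toNat g 0 z hgz (by omega)]
      obtain ⟨fuel, rfl⟩ : ∃ m, fuel = m + 1 := ⟨fuel - 1, by omega⟩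
      refine ⟨k, g + k, hk, by linear_combination hg, by omega, hhit, ?_⟩
      show chapyoroLoop (fuel + 1) (k + 1) z (0 + (z - g)) z = _
      rw [chapyoroLoop_hit]
      simp only [List.cons.injEq, and_true]
      exact ⟨by ring, by ring⟩
    · rw [chapyoroInner_miss k.toNat g 0 z (by omega), hkNat]
      exact ih (k + 1) (g + k) (0 + k) z (by omega) (by linear_combination hg)
        (by omega) (by omega)

-- B's loop: with invariant 2*t = d*(d+1) and t - d < z it stops at the same diagonal
theorem chapyoroAltLoop_spec (fuel : Nat) :
    ∀ (d t z : Int), 1 ≤ d → 2 * t = d * (d + 1) → t - d < z →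
    (z - t).toNat ≤ fuel →
    ∃ D TD, 1 ≤ D ∧ 2 * TD = D * (D + 1) ∧ TD - D < z ∧ z ≤ TD ∧
      chapyoroAltLoop fuel d t z = (D, TD) := by
  induction fuel with
  | zero =>
    intro d t z hd ht htz hfuel
    refine ⟨d, t, hd, ht, htz, by omega, ?_⟩
    simp [chapyoroAltLoop]
  | succ fuel ih =>
    intro d t z hd ht htz hfuel
    simp only [chapyoroAltLoop]
    by_cases hlt : t < z
    · rw [if_pos hlt]
      exact ih (d + 1) (t + (d + 1)) z (by omega) (by linear_combination ht) (by omega)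
        (by omega)
    · rw [if_neg hlt]
      exact ⟨d, t, hd, ht, htz, by omega, rfl⟩

-- the diagonal D with T(D-1) < z ≤ T(D) is unique
theorem diag_unique (D1 TD1 D2 TD2 z : Int)
    (h1 : 1 ≤ D1) (t1 : 2 * TD1 = D1 * (D1 + 1)) (l1 : TD1 - D1 < z) (u1 : z ≤ TD1)
    (h2 : 1 ≤ D2) (t2 : 2 * TD2 = D2 * (D2 + 1)) (l2 : TD2 - D2 < z) (u2 : z ≤ TD2) :
    D1 = D2 ∧ TD1 = TD2 := by
  have hD : D1 = D2 := by
    by_contra hne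
    rcases lt_or_gt_of_ne hne with h | h
    · nlinarith [t1, t2, u1, l2, sq_nonneg (D2 - D1 - 1)]
    · nlinarith [t1, t2, u2, l1, sq_nonneg (D1 - D2 - 1)]
  subst hD
  have h2T : 2 * TD1 = 2 * TD2 := t1.trans t2.symm
  exact ⟨rfl, by omega⟩

-- ===== VERDICT (by name: the statement is the Claim_ definition above) =====
theorem chapyoro_spec : Claim_equal_chapyoro := by
  intro z _ hz
  replace hz : 1 ≤ z := hz
  unfold Spec_chapyoro chapyoro chapyoro_alt
  obtain ⟨D1, TD1, a1, a2, a3, a4, ha⟩ :=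
    chapyoroLoop_spec (z.toNat + 2) 1 0 0 z (by omega) (by ring) (by omega) (by omega)
  obtain ⟨D2, TD2, b1, b2, b3, b4, hb⟩ :=
    chapyoroAltLoop_spec z.toNat 1 1 z (by omega) (by ring) (by omega) (by omega)
  obtain ⟨hD, hT⟩ := diag_unique D1 TD1 D2 TD2 z a1 a2 a3 a4 b1 b2 b3 b4
  rw [ha, hb]
  subst hD hT
  rfl
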